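-- pv_equiv track=rewrite | github.com/saltastroops/salt-api | saltapi/repository/pipt_repository.py | format_lamp_setup
-- ===== SOURCE A (Python) =====
-- def format_lamp_setup(orders: str, lamps: str) -> str:
--     """
--     Given order and lamp strings like "3-2-1-2" and "Ne-Ar-Xe-Kr", returns a formatted setup string.
--
--     Example:
--     orders = "3-2-1-2"
--     lamps = "Ne-Ar-Xe-Kr"
--     Output: "Xe; Ar and Kr; Ne"
--     """
--     orders_array = [int(order_str) for order_str in orders.split("-")]
--     lamps_array = lamps.split("-")
--
--     ordered_lamps = {}
--     for order, lamp in zip(orders_array, lamps_array):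
--         ordered_lamps.setdefault(order, []).append(lamp)
--
--     setup_parts = []
--     for i in sorted(ordered_lamps.keys()):
--         lamps_in_order = sorted(ordered_lamps[i])
--         setup_parts.append(" and ".join(lamps_in_order))
--
--     return "; ".join(setup_parts)
-- ===== SOURCE B (Python) =====
-- def format_lamp_setup(orders: str, lamps: str) -> str:
--     """Sort (order, lamp) pairs once by the full tuple, then group consecutive
--     equal orders in a single linear pass -- no dict, no per-group sorts."""
--     order_ints = [int(order_str) for order_str in orders.split("-")]
--     pairs = sorted(zip(order_ints, lamps.split("-")))
--     groups = []
--     prev = None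
--     for order, lamp in pairs:
--         if groups and prev == order:
--             groups[-1].append(lamp)
--         else:
--             groups.append([lamp])
--         prev = order
--     return "; ".join(" and ".join(g) for g in groups)
-- ===== Notes on version B (the rewrite author's own statement) =====
-- stated objective: alternative
-- what changed: Replaces the grouping dict with key-sort plus per-group sorts by one combined sort of (order, lamp) tuples followed by a single linear pass that groups consecutive equal orders.
import Mathlib
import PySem

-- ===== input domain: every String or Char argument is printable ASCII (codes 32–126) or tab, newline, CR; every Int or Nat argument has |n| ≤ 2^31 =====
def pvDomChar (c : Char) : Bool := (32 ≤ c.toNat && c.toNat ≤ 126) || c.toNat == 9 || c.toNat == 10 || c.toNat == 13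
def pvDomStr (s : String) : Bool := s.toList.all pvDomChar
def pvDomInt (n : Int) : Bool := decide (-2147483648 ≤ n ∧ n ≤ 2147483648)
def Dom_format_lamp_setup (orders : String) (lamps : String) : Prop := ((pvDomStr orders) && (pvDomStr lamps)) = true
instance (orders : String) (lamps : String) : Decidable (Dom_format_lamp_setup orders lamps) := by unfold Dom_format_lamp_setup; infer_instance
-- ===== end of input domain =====

-- B replaces A's grouping dict + per-group sorts by ONE sort of (order, lamp) pairs and a
-- single linear grouping pass over the sorted pairs (objective: alternative algorithm).

-- s.split("-"): split? is some because the separator is nonempty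
def pvSplitDash (s : String) : List String := (PySem.Str.split? s "-").getD []

-- shared helper: the comprehension "[int(s) for s in …]" (none = the ValueError excluded by Pre_)
def pvParseInts : List String → Option (List Int)
  | [] => some []
  | s :: t =>
    match PySem.Int.ofStr? s, pvParseInts t with
    | some n, some ns => some (n :: ns)
    | _, _ => none

-- ===== PORT A =====
def format_lamp_setup (orders : String) (lamps : String) : String :=
  match pvParseInts (pvSplitDash orders) with
  | none => ""   -- int() raises ValueError here; excluded by Pre_
  | some ordersArray =>
    let lampsArray := pvSplitDash lamps
    let orderedLamps := (ordersArray.zip lampsArray).foldl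
      (fun d p => d.modify p.1 [] (fun g => g ++ [p.2])) PySem.Dict.empty
    let setupParts := (PySem.List.sorted orderedLamps.keys (fun k => k)).foldl
      (fun acc i => acc ++ [PySem.Str.join " and " (PySem.List.sorted (orderedLamps.getD i []) (fun l => l))]) []
    PySem.Str.join "; " setupParts

-- ===== PORT B =====
-- the body of B's grouping loop
def pvStep (st : List (List String) × Option Int) (p : Int × String) : List (List String) × Option Int :=
  if st.1 ≠ [] ∧ st.2 = some p.1 then
    (st.1.dropLast ++ [st.1.getLast?.getD [] ++ [p.2]], some p.1)
  else
    (st.1 ++ [[p.2]], some p.1)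

def format_lamp_setup_alt (orders : String) (lamps : String) : String :=
  match pvParseInts (pvSplitDash orders) with
  | none => ""   -- int() raises ValueError here; excluded by Pre_
  | some orderInts =>
    let pairs := PySem.List.sorted2 (orderInts.zip (pvSplitDash lamps))
      (fun p => p.1) (fun p => p.2)
    let st := pairs.foldl pvStep ([], none)
    PySem.Str.join "; " (st.1.map (fun g => PySem.Str.join " and " g))

-- ===== PRECONDITION & SPEC =====
-- Pre_: every "-"-separated token of `orders` parses as a Python int (otherwise A raises ValueError)
def Pre_format_lamp_setup (orders : String) (lamps : String) : Prop :=
  ∀ s ∈ pvSplitDash orders, (PySem.Int.ofStr? s).isSome = true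
instance (orders : String) (lamps : String) : Decidable (Pre_format_lamp_setup orders lamps) := by
  unfold Pre_format_lamp_setup; infer_instance

def pvWitness_format_lamp_setup : String × String := ("3-2-1-2", "Ne-Ar-Xe-Kr")

def Spec_format_lamp_setup (orders : String) (lamps : String) (out : String) : Prop := out = format_lamp_setup_alt orders lamps
instance (orders : String) (lamps : String) (out : String) : Decidable (Spec_format_lamp_setup orders lamps out) := by unfold Spec_format_lamp_setup; infer_instance

-- ===== CLAIM (what is proved, stated in full; the proofs are below) =====
def Claim_equal_format_lamp_setup : Prop := ∀ (orders : String) (lamps : String), Dom_format_lamp_setup orders lamps → Pre_format_lamp_setup orders lamps → Spec_format_lamp_setup orders lamps (format_lamp_setup orders lamps)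

-- ===== LEMMAS AND PROOFS =====

theorem pvParseInts_isSome (L : List String)
    (h : ∀ s ∈ L, (PySem.Int.ofStr? s).isSome = true) : ∃ v, pvParseInts L = some v := by
  induction L with
  | nil => exact ⟨[], rfl⟩
  | cons s t ih =>
    obtain ⟨v, hv⟩ := ih (fun x hx => h x (List.mem_cons_of_mem _ hx))
    obtain ⟨n, hn⟩ := Option.isSome_iff_exists.mp (h s (List.mem_cons_self ..))
    exact ⟨n :: v, by simp [pvParseInts, hn, hv]⟩

-- Python's sorted(pairs) on 2-tuples is sorting by the lexicographic key
theorem sorted2_eq_sorted_toLex (xs : List (Int × String)) :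
    PySem.List.sorted2 xs (fun p => p.1) (fun p => p.2) =
      PySem.List.sorted xs (fun p => toLex p) := by
  simp only [PySem.List.sorted2, PySem.List.sorted, if_neg Bool.false_ne_true]
  have h : (fun (a b : Int × String) => decide (a.1 < b.1) || (!decide (b.1 < a.1) && decide (a.2 < b.2)))
      = fun a b => decide (toLex a < toLex b) := by
    funext a b
    rcases lt_trichotomy a.1 b.1 with h | h | h
    · simp [Prod.Lex.toLex_lt_toLex, h]
    · simp [Prod.Lex.toLex_lt_toLex, h]
    · simp [Prod.Lex.toLex_lt_toLex, h, not_lt.mpr (le_of_lt h), h.ne']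
  rw [h]

theorem ofList_sublist {α : Type} [BEq α] (xs : List α) : (PySem.Set.ofList xs).Sublist xs := by
  induction xs using List.reverseRecOn with
  | nil => simp
  | append_singleton l a ih =>
    have h : PySem.Set.ofList (l ++ [a]) = PySem.Set.add (PySem.Set.ofList l) a := by
      simp [PySem.Set.ofList_eq_foldl]
    rw [h]
    unfold PySem.Set.add
    split
    · exact ih.trans (List.sublist_append_left _ _)
    · exact List.Sublist.append ih (List.Sublist.refl _)

theorem le_getLast_of_pairwise {l : List Int} {a m : Int}
    (hp : l.Pairwise (· ≤ ·)) (ha : a ∈ l) (hm : l.getLast? = some m) : a ≤ m := by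
  obtain ⟨l', rfl⟩ := List.getLast?_eq_some_iff.mp hm
  rcases List.mem_append.mp ha with h | h
  · exact ((List.pairwise_append.mp hp).2.2 a h m (List.mem_singleton_self m))
  · simp_all

theorem getLast_ofList_of_pairwise {l : List Int} (hp : l.Pairwise (· ≤ ·)) :
    (PySem.Set.ofList l).getLast? = l.getLast? := by
  induction l using List.reverseRecOn with
  | nil => simp [PySem.Set.ofList]
  | append_singleton t a ih =>
    have h : PySem.Set.ofList (t ++ [a]) = PySem.Set.add (PySem.Set.ofList t) a := by
      simp [PySem.Set.ofList_eq_foldl]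
    rw [h]
    have hp' := (List.pairwise_append.mp hp).1
    have hb := (List.pairwise_append.mp hp).2.2
    unfold PySem.Set.add
    split
    · rename_i hc
      have hmem : a ∈ t := by
        have : a ∈ PySem.Set.ofList t := by
          simpa using (List.contains_iff_mem).mp hc
        exact (ofList_sublist t).mem this
      -- t ≠ [], last of t = some m with m ≤ a and a ≤ m
      have hne : t ≠ [] := by rintro rfl; simp at hmem
      obtain ⟨m, hm⟩ := Option.isSome_iff_exists.mp (List.getLast?_isSome.mpr hne)
      have h1 : a ≤ m := le_getLast_of_pairwise hp' hmem hm
      have h2 : m ≤ a := hb m (List.mem_of_getLast? hm) a (List.mem_singleton_self a)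
      rw [ih hp', hm, List.getLast?_concat]
      exact congrArg some (le_antisymm h2 h1)
    · simp

-- the single grouping pass over key-sorted pairs produces, for each distinct key in
-- first-occurrence order, the lamps carrying that key (plus the last key seen)
theorem scan_spec (qs : List (Int × String)) (h : qs.Pairwise (fun a b => a.1 ≤ b.1)) :
    qs.foldl pvStep ([], none) =
      ((PySem.Set.ofList (qs.map (fun p => p.1))).map
          (fun k => (qs.filter (fun p => p.1 == k)).map (fun p => p.2)),
        (qs.map (fun p => p.1)).getLast?) := by
  induction qs using List.reverseRecOn with
  | nil => simp [PySem.Set.ofList]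
  | append_singleton qs p ih =>
    have hp' : qs.Pairwise (fun a b => a.1 ≤ b.1) := (List.pairwise_append.mp h).1
    have hb : ∀ x ∈ qs, x.1 ≤ p.1 := by
      intro x hx
      exact (List.pairwise_append.mp h).2.2 x hx p (List.mem_singleton_self p)
    have hkp : (qs.map (fun p => p.1)).Pairwise (· ≤ ·) := List.pairwise_map.mpr hp'
    rw [List.foldl_append, ih hp']
    set keys := qs.map (fun p => p.1) with hkeys
    set K := PySem.Set.ofList keys with hK
    set F := fun k => (qs.filter (fun p => p.1 == k)).map (fun p => p.2) with hF
    have hofl : PySem.Set.ofList (keys ++ [p.1]) = PySem.Set.add K p.1 := by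
      simp [PySem.Set.ofList_eq_foldl, hK]
    have hmapkeys : (qs ++ [p]).map (fun p => p.1) = keys ++ [p.1] := by simp [hkeys]
    have hfilter : ∀ k, ((qs ++ [p]).filter (fun q => q.1 == k)).map (fun q => q.2)
        = F k ++ (if p.1 == k then [p.2] else []) := by
      intro k
      simp only [List.filter_append, List.map_append, hF]
      congr 1
      by_cases hk : p.1 == k <;> simp [List.filter, hk]
    simp only [List.foldl_cons, List.foldl_nil, pvStep, hmapkeys]
    split
    · rename_i hc
      obtain ⟨hne, hlast⟩ := hc
      have hmem : p.1 ∈ keys := List.mem_of_getLast? hlast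
      have hKeq : PySem.Set.ofList (keys ++ [p.1]) = K := by
        rw [hofl]
        unfold PySem.Set.add
        have hcont : K.contains p.1 = true :=
          List.contains_iff_mem.mpr ((PySem.Set.mem_ofList keys p.1).mpr hmem)
        rw [if_pos hcont]
      have hKlast : K.getLast? = some p.1 := by
        rw [hK, getLast_ofList_of_pairwise hkp]; exact hlast
      obtain ⟨K', hK'⟩ := List.getLast?_eq_some_iff.mp hKlast
      have hnodup : K.Nodup := PySem.Set.nodup_ofList keys
      have hnotin : p.1 ∉ K' := by
        rw [hK'] at hnodup
        exact fun hmem' => (List.disjoint_of_nodup_append hnodup) hmem' (List.mem_singleton_self _)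
      rw [hKeq, List.getLast?_concat, hK']
      simp only [List.map_append, List.map_cons, List.map_nil, List.dropLast_concat,
        List.getLast?_concat, Option.getD_some]
      refine Prod.ext ?_ rfl
      show List.map F K' ++ [F p.1 ++ [p.2]] = _
      congr 1
      · exact (List.map_congr_left (fun k hk => by
          rw [hfilter k, if_neg (by simp; exact fun e => hnotin (e ▸ hk)), List.append_nil])).symm
      · rw [hfilter p.1]; simp
    · rename_i hc
      have hnot : p.1 ∉ keys := by
        intro hmem
        have hne : keys ≠ [] := by rintro e; rw [e] at hmem; simp at hmem
        obtain ⟨m, hm⟩ := Option.isSome_iff_exists.mp (List.getLast?_isSome.mpr hne)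
        have h1 : p.1 ≤ m := le_getLast_of_pairwise hkp hmem hm
        have hmmem : m ∈ keys := List.mem_of_getLast? hm
        obtain ⟨q, hq, hq1⟩ := List.mem_map.mp hmmem
        have h2 : m ≤ p.1 := hq1 ▸ hb q hq
        have : keys.getLast? = some p.1 := by rw [hm]; exact congrArg some (le_antisymm h2 h1)
        have hKne : K ≠ [] := by
          intro e
          have := (PySem.Set.mem_ofList keys p.1).mpr hmem
          rw [← hK] at this; rw [e] at this; simp at this
        exact hc ⟨by simp [hKne], this⟩
      have hKeq : PySem.Set.ofList (keys ++ [p.1]) = K ++ [p.1] := by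
        rw [hofl]
        unfold PySem.Set.add
        have hcont : ¬ K.contains p.1 = true := fun hcon =>
          hnot ((PySem.Set.mem_ofList keys p.1).mp (List.contains_iff_mem.mp hcon))
        rw [if_neg hcont, hK]
      rw [hKeq, List.getLast?_concat]
      simp only [List.map_append, List.map_cons, List.map_nil]
      refine Prod.ext ?_ rfl
      show List.map F K ++ [[p.2]] = _
      congr 1
      · exact (List.map_congr_left (fun k hk => by
          have hkmem : k ∈ keys := (PySem.Set.mem_ofList keys k).mp (hK ▸ hk)
          rw [hfilter k, if_neg (by simp; exact fun e => hnot (e ▸ hkmem)), List.append_nil])).symm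
      · rw [hfilter p.1]
        have : qs.filter (fun q => q.1 == p.1) = [] := by
          rw [List.filter_eq_nil_iff]
          intro q hq hqe
          exact hnot (List.mem_map.mpr ⟨q, hq, by simpa using hqe⟩)
        simp [hF, this]

-- the heart of the equivalence: A's dict-grouped, per-key-sorted output equals
-- B's scan over the once-sorted pairs
theorem core_eq (os : List Int) (ls : List String) :
    PySem.Str.join "; "
      ((PySem.List.sorted
          ((os.zip ls).foldl (fun d p => d.modify p.1 [] (fun g => g ++ [p.2])) PySem.Dict.empty).keys
          (fun k => k)).foldl
        (fun acc i => acc ++ [PySem.Str.join " and "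
          (PySem.List.sorted
            (((os.zip ls).foldl (fun d p => d.modify p.1 [] (fun g => g ++ [p.2])) PySem.Dict.empty).getD i [])
            (fun l => l))]) [])
    = PySem.Str.join "; "
        (((PySem.List.sorted2 (os.zip ls) (fun p => p.1) (fun p => p.2)).foldl pvStep ([], none)).1.map
          (fun g => PySem.Str.join " and " g)) := by
  set ps := os.zip ls with hps
  set qs := PySem.List.sorted ps (fun p => toLex p) with hqs
  have hqlex : qs.Pairwise (fun a b => toLex a ≤ toLex b) := PySem.List.sorted_pairwise ps _
  have hq1 : qs.Pairwise (fun a b => a.1 ≤ b.1) := by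
    refine hqlex.imp ?_
    intro a b hab
    rcases Prod.Lex.toLex_le_toLex.mp hab with h | h
    · exact le_of_lt h
    · exact le_of_eq h.1
  have hperm : qs.Perm ps := PySem.List.sorted_perm ps _ _
  -- A side: dict keys and values
  rw [PySem.List.foldl_append_singleton_eq_map, List.nil_append]
  rw [sorted2_eq_sorted_toLex, ← hqs, scan_spec qs hq1]
  have hkeys : ((ps.foldl (fun d p => d.modify p.1 [] (fun g => g ++ [p.2])) PySem.Dict.empty).keys)
      = PySem.Set.ofList (ps.map (fun p => p.1)) := by
    rw [PySem.Dict.keys_foldl_modify_key ps (fun p => p.1) [] (fun d p => fun g => g ++ [p.2]) PySem.Dict.empty]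
    rw [PySem.Dict.keys_empty]
    rw [PySem.Set.ofList_eq_foldl]
    rfl
  have hgetD : ∀ k, ((ps.foldl (fun d p => d.modify p.1 [] (fun g => g ++ [p.2])) PySem.Dict.empty).getD k [])
      = (ps.filter (fun p => p.1 == k)).map (fun p => p.2) := by
    intro k
    rw [PySem.Dict.getD_foldl_modify_append ps PySem.Dict.empty k, PySem.Dict.getD_empty, List.nil_append]
  rw [hkeys]
  -- the sorted distinct keys coincide
  have hsortK : PySem.List.sorted (PySem.Set.ofList (ps.map (fun p => p.1))) (fun k => k)
      = PySem.Set.ofList (qs.map (fun p => p.1)) := by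
    apply PySem.List.sorted_eq_of_perm_of_pairwise_lt
    · rw [List.perm_ext_iff_of_nodup (PySem.Set.nodup_ofList _) (PySem.Set.nodup_ofList _)]
      intro a
      rw [PySem.Set.mem_ofList, PySem.Set.mem_ofList]
      exact List.Perm.mem_iff (List.Perm.map _ hperm)
    · have hkq : (qs.map (fun p => p.1)).Pairwise (· ≤ ·) := List.pairwise_map.mpr hq1
      have hle : (PySem.Set.ofList (qs.map (fun p => p.1))).Pairwise (· ≤ ·) :=
        hkq.sublist (ofList_sublist _)
      have hne : (PySem.Set.ofList (qs.map (fun p => p.1))).Pairwise (· ≠ ·) :=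
        PySem.Set.nodup_ofList _
      exact (hle.and hne).imp (fun h => lt_of_le_of_ne h.1 h.2)
  rw [hsortK, List.map_map]
  apply congrArg
  apply List.map_congr_left
  intro k hk
  apply congrArg
  rw [hgetD k]
  -- per-key: the slice of the sorted pairs is the sorted slice
  apply PySem.List.sorted_id_eq_of_perm_of_pairwise
  · exact List.Perm.map _ (List.Perm.filter _ hperm)
  · have hfl : (qs.filter (fun p => p.1 == k)).Pairwise (fun a b => toLex a ≤ toLex b) :=
      hqlex.filter _
    rw [List.pairwise_map]
    refine hfl.imp_of_mem ?_
    intro a b ha hb hab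
    have ha1 : a.1 = k := by simpa using (List.of_mem_filter ha)
    have hb1 : b.1 = k := by simpa using (List.of_mem_filter hb)
    rcases Prod.Lex.toLex_le_toLex.mp hab with h | h
    · rw [ha1, hb1] at h; exact absurd h (lt_irrefl k)
    · exact h.2

-- ===== VERDICT (by name: the statement is the Claim_ definition above) =====
theorem format_lamp_setup_spec : Claim_equal_format_lamp_setup := by
  intro orders lamps _ hpre
  unfold Spec_format_lamp_setup
  obtain ⟨os, hos⟩ := pvParseInts_isSome _ hpre
  unfold format_lamp_setup format_lamp_setup_alt
  rw [hos]
  exact core_eq os (pvSplitDash lamps)
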